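-- pv_equiv track=rewrite | github.com/MarekSurma/ClearSwarm | src/multi_agent/core/orchestrator.py | categorize_tool_calls
-- ===== SOURCE A (Python) =====
-- from typing import Dict, List, Optional, Any, Tuple, Callable, Awaitable
--
-- END_SESSION_TOOL = 'end_session'  # Tool name for ending agent session
--
-- def categorize_tool_calls(tool_calls: List[Dict[str, Any]]) -> Tuple[Optional[Dict], List[Dict], List[Dict]]:
--     """
--     Categorize tool calls into end_session, synchronous, and asynchronous.
--
--     Args:
--         tool_calls: List of tool call dictionaries
--
--     Returns:
--         Tuple of (end_session_call, sync_tool_calls, async_tool_calls)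
--     """
--     end_session_call = None
--     sync_tool_calls = []
--     async_tool_calls = []
--
--     for tool_call in tool_calls:
--         if tool_call['tool_name'] == END_SESSION_TOOL:
--             end_session_call = tool_call
--         elif tool_call.get('call_mode', 'synchronous') == 'synchronous':
--             sync_tool_calls.append(tool_call)
--         else:
--             async_tool_calls.append(tool_call)
--
--     return end_session_call, sync_tool_calls, async_tool_calls
-- ===== SOURCE B (Python) =====
-- from typing import Dict, List, Optional, Any, Tuple
--
-- END_SESSION_TOOL = 'end_session'  # Tool name for ending agent session
--
--
-- def categorize_tool_calls(tool_calls: List[Dict[str, Any]]) -> Tuple[Optional[Dict], List[Dict], List[Dict]]: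
--     """Three independent passes: last end_session via a reversed scan, then two filters."""
--     end_session_call = next(
--         (t for t in reversed(tool_calls) if t['tool_name'] == END_SESSION_TOOL), None)
--     sync_tool_calls = [
--         t for t in tool_calls
--         if t['tool_name'] != END_SESSION_TOOL
--         and t.get('call_mode', 'synchronous') == 'synchronous']
--     async_tool_calls = [
--         t for t in tool_calls
--         if t['tool_name'] != END_SESSION_TOOL
--         and t.get('call_mode', 'synchronous') != 'synchronous']
--     return end_session_call, sync_tool_calls, async_tool_calls
-- ===== Notes on version B (the rewrite author's own statement) =====
-- stated objective: idiomatic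
-- what changed: Replaces the single accumulating loop over mutable state with three independent passes: a reversed scan with next() for the last end_session call and two filtering comprehensions for the sync/async buckets.
import Mathlib
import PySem

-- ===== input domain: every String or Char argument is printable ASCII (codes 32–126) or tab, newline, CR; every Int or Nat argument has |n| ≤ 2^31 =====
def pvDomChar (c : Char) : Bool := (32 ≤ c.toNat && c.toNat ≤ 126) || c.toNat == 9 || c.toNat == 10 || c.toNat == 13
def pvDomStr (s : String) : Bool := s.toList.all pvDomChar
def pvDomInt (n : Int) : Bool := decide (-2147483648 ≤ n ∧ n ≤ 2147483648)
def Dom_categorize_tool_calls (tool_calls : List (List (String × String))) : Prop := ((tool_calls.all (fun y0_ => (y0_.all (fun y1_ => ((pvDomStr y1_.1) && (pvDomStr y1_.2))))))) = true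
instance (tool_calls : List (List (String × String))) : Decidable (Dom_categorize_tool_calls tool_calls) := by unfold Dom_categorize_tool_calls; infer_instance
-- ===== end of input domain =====

-- B replaces A's single accumulating loop with three independent passes (reversed scan for the
-- last end_session call, two filters); same O(n) cost, more idiomatic decomposition.


-- ===== PORT A =====
-- A: one loop; end_session overwrites, others are appended to sync/async by call_mode.
def categorize_tool_calls (tool_calls : List (List (String × String))) : (Option (List (String × String))) × (List (List (String × String))) × (List (List (String × String))) :=
  tool_calls.foldl
    (fun st tool_call =>
      let (e, s, a) := st
      if (PySem.Dict.mk tool_call).get? "tool_name" = some "end_session" then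
        (some tool_call, s, a)
      else if (PySem.Dict.mk tool_call).getD "call_mode" "synchronous" = "synchronous" then
        (e, s ++ [tool_call], a)
      else
        (e, s, a ++ [tool_call]))
    (none, [], [])

-- ===== PORT B =====
def isEndSession (tc : List (String × String)) : Bool :=
  (PySem.Dict.mk tc).get? "tool_name" == some "end_session"

def isSyncMode (tc : List (String × String)) : Bool :=
  (PySem.Dict.mk tc).getD "call_mode" "synchronous" == "synchronous"

def categorize_tool_calls_alt (tool_calls : List (List (String × String))) : (Option (List (String × String))) × (List (List (String × String))) × (List (List (String × String))) :=
  (tool_calls.reverse.find? isEndSession,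
   tool_calls.filter (fun tc => !isEndSession tc && isSyncMode tc),
   tool_calls.filter (fun tc => !isEndSession tc && !isSyncMode tc))

-- ===== PRECONDITION & SPEC =====
-- Pre_ excludes exactly the inputs where a tool call lacks the 'tool_name' key: there Python A
-- (and B alike) raises KeyError.
def Pre_categorize_tool_calls (tool_calls : List (List (String × String))) : Prop :=
  ∀ tc ∈ tool_calls, (PySem.Dict.mk tc).contains "tool_name" = true
instance (tool_calls : List (List (String × String))) : Decidable (Pre_categorize_tool_calls tool_calls) := by unfold Pre_categorize_tool_calls; infer_instance

def pvWitness_categorize_tool_calls : (List (List (String × String))) :=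
  [[("tool_name", "end_session")], [("tool_name", "ping"), ("call_mode", "async")]]

def Spec_categorize_tool_calls (tool_calls : List (List (String × String))) (out : (Option (List (String × String))) × (List (List (String × String))) × (List (List (String × String)))) : Prop := out = categorize_tool_calls_alt tool_calls
instance (tool_calls : List (List (String × String))) (out : (Option (List (String × String))) × (List (List (String × String))) × (List (List (String × String)))) : Decidable (Spec_categorize_tool_calls tool_calls out) := by unfold Spec_categorize_tool_calls; infer_instance

-- ===== CLAIM (what is proved, stated in full; the proofs are below) =====
def Claim_equal_categorize_tool_calls : Prop := ∀ (tool_calls : List (List (String × String))), Dom_categorize_tool_calls tool_calls → Pre_categorize_tool_calls tool_calls → Spec_categorize_tool_calls tool_calls (categorize_tool_calls tool_calls)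

-- ===== LEMMAS AND PROOFS =====

-- Invariant of A's loop, generalized over the initial state.
lemma categorize_loop_inv (l : List (List (String × String)))
    (e : Option (List (String × String))) (s a : List (List (String × String))) :
    l.foldl
      (fun st tool_call =>
        let (e, s, a) := st
        if (PySem.Dict.mk tool_call).get? "tool_name" = some "end_session" then
          (some tool_call, s, a)
        else if (PySem.Dict.mk tool_call).getD "call_mode" "synchronous" = "synchronous" then
          (e, s ++ [tool_call], a)
        else
          (e, s, a ++ [tool_call]))
      (e, s, a)
    = ((l.reverse.find? isEndSession).or e,
       s ++ l.filter (fun tc => !isEndSession tc && isSyncMode tc),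
       a ++ l.filter (fun tc => !isEndSession tc && !isSyncMode tc)) := by
  induction l generalizing e s a with
  | nil => simp
  | cons x xs ih =>
    by_cases hend : (PySem.Dict.mk x).get? "tool_name" = some "end_session"
    · simp [List.foldl_cons, hend, ih, List.find?_append, isEndSession]
    · by_cases hsync : (PySem.Dict.mk x).getD "call_mode" "synchronous" = "synchronous" <;>
        simp [List.foldl_cons, hend, hsync, ih, List.find?_append, isEndSession, isSyncMode,
          List.append_assoc]

-- ===== VERDICT (by name: the statement is the Claim_ definition above) =====
theorem categorize_tool_calls_spec : Claim_equal_categorize_tool_calls := by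
  intro tool_calls _ _
  show _ = _
  simp [categorize_tool_calls, categorize_tool_calls_alt, categorize_loop_inv]
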